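-- pv_equiv track=rewrite | github.com/bsullins/autotube | makevid.py | read_clip_data
-- ===== SOURCE A (Python) =====
-- def read_clip_data(clip_data, video_end_timecode):
--     first_clip = "00:00:00"
--     last_clip = None
--
--     clip_list = []
--
--     lines = clip_data.split("\n")
--     for line in lines:
--         if line.startswith("START"):
--             pass
--         elif line.startswith("STOP"):
--             pass
--         elif len(line) == 0:
--             pass
--         else:
--             if last_clip is None:
--                 last_clip = first_clip
--
--             clip_list.append([last_clip, line])
--             last_clip = line
--
--     clip_list.append([last_clip, video_end_timecode])
--
--     return clip_list
-- ===== SOURCE B (Python) =====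
-- def read_clip_data(clip_data, video_end_timecode):
--     valid = [l for l in clip_data.split("\n")
--              if l and not l.startswith("START") and not l.startswith("STOP")]
--     bounds = ["00:00:00"] + valid + [video_end_timecode]
--     return [[a, b] for a, b in zip(bounds, bounds[1:])]
-- ===== Notes on version B (the rewrite author's own statement) =====
-- stated objective: simpler
-- what changed: Replaces A's single-pass accumulation with mutable last_clip/None state by a filter of valid lines followed by zipping consecutive boundaries ['00:00:00'] + valid + [end].
-- outside the precondition, e.g. on read_clip_data('', '00:10:00'): A returns [[None, '00:10:00']], B returns [['00:00:00', '00:10:00']]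
import Mathlib
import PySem

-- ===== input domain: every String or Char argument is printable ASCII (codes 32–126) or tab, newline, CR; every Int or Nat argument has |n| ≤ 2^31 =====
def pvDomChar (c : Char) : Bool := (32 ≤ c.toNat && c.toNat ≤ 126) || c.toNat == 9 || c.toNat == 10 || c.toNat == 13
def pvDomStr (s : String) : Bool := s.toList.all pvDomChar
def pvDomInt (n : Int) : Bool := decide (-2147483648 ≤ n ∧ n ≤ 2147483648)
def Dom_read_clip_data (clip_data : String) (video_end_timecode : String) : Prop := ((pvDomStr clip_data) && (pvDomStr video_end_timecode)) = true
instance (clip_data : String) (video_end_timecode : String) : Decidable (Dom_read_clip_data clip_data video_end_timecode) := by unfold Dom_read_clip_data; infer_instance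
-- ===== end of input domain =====

-- B replaces A's single-pass accumulator (mutable last_clip starting as None) by filter-then-zip of
-- consecutive boundaries; objective: simpler.

-- ===== PORT A =====
-- one loop iteration of A's for-loop; state = (last_clip, clip_list)
def pvStepA (st : Option String × List (List String)) (line : String) :
    Option String × List (List String) :=
  if PySem.Str.startswith line "START" then st
  else if PySem.Str.startswith line "STOP" then st
  else if PySem.Str.len line = 0 then st
  else (some line, st.2 ++ [[st.1.getD "00:00:00", line]])

def read_clip_data (clip_data : String) (video_end_timecode : String) : List (List String) :=
  let lines := (PySem.Str.split? clip_data "\n").getD []   -- sep "\n" ≠ "", never none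
  let st := lines.foldl pvStepA (none, [])
  -- Python appends [last_clip, video_end_timecode]; last_clip is None only outside Pre_,
  -- where the Python value [[None, …]] is not of the declared type ("" stands in there)
  st.2 ++ [[st.1.getD "", video_end_timecode]]

-- ===== PORT B =====
def pvKeep (l : String) : Bool :=
  decide (PySem.Str.len l ≠ 0) && !PySem.Str.startswith l "START" && !PySem.Str.startswith l "STOP"

def read_clip_data_alt (clip_data : String) (video_end_timecode : String) : List (List String) :=
  let valid := ((PySem.Str.split? clip_data "\n").getD []).filter pvKeep
  let bounds := ["00:00:00"] ++ valid ++ [video_end_timecode]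
  (bounds.zip bounds.tail).map (fun p => [p.1, p.2])

-- ===== PRECONDITION & SPEC =====
-- Pre_ excludes inputs with no valid clip line: there Python A returns [[None, video_end_timecode]],
-- whose None is not a String, so A's value leaves the declared type List (List String).
def Pre_read_clip_data (clip_data : String) (video_end_timecode : String) : Prop :=
  ((PySem.Str.split? clip_data "\n").getD []).filter pvKeep ≠ []
instance (clip_data : String) (video_end_timecode : String) : Decidable (Pre_read_clip_data clip_data video_end_timecode) := by unfold Pre_read_clip_data; infer_instance

def pvWitness_read_clip_data : String × String := ("START\n00:01:00\n00:02:30\nSTOP", "00:10:00")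

def Spec_read_clip_data (clip_data : String) (video_end_timecode : String) (out : List (List String)) : Prop := out = read_clip_data_alt clip_data video_end_timecode
instance (clip_data : String) (video_end_timecode : String) (out : List (List String)) : Decidable (Spec_read_clip_data clip_data video_end_timecode out) := by unfold Spec_read_clip_data; infer_instance

-- ===== CLAIM (what is proved, stated in full; the proofs are below) =====
def Claim_equal_read_clip_data : Prop := ∀ (clip_data : String) (video_end_timecode : String), Dom_read_clip_data clip_data video_end_timecode → Pre_read_clip_data clip_data video_end_timecode → Spec_read_clip_data clip_data video_end_timecode (read_clip_data clip_data video_end_timecode)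

-- ===== LEMMAS AND PROOFS =====

-- common description of both results on nonempty valid lists: consecutive pairs of x :: v ++ [e]
def pvPairsFrom : String → List String → String → List (List String)
  | x, [], e => [[x, e]]
  | x, y :: ys, e => [x, y] :: pvPairsFrom y ys e

-- the pairs A's loop has appended so far, given the current last_clip x and remaining valid lines
def pvInner : String → List String → List (List String)
  | _, [] => []
  | x, y :: ys => [x, y] :: pvInner y ys

-- last element of the list, or the default when it is empty (A's last_clip after the loop)
def pvLastD : List String → String → String
  | [], x => x
  | y :: ys, _ => pvLastD ys y

theorem pvStepA_eq (st : Option String × List (List String)) (line : String) :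
    pvStepA st line =
      if pvKeep line then (some line, st.2 ++ [[st.1.getD "00:00:00", line]]) else st := by
  unfold pvStepA pvKeep
  by_cases h1 : PySem.Str.startswith line "START" <;>
    by_cases h2 : PySem.Str.startswith line "STOP" <;>
      by_cases h3 : PySem.Str.len line = 0 <;> simp_all

theorem pvFoldA_some (lines : List String) (x : String) (acc : List (List String)) :
    lines.foldl pvStepA (some x, acc) =
      (some (pvLastD (lines.filter pvKeep) x), acc ++ pvInner x (lines.filter pvKeep)) := by
  induction lines generalizing x acc with
  | nil => simp [pvInner, pvLastD]
  | cons l ls ih =>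
    rw [List.foldl_cons, pvStepA_eq]
    by_cases hk : pvKeep l
    · simp only [hk, if_true, List.filter_cons_of_pos hk, ih l, pvLastD, pvInner]
      simp
    · simp [hk, List.filter_cons_of_neg hk, ih x acc]

theorem pvFoldA_none (lines : List String) :
    lines.foldl pvStepA (none, []) =
      (if h : lines.filter pvKeep = [] then ((none : Option String), ([] : List (List String)))
       else (some (pvLastD (lines.filter pvKeep) "00:00:00"),
             pvInner "00:00:00" (lines.filter pvKeep))) := by
  induction lines with
  | nil => simp
  | cons l ls ih =>
    rw [List.foldl_cons, pvStepA_eq]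
    by_cases hk : pvKeep l
    · simp only [hk, if_true, Option.getD_none, List.nil_append,
        List.filter_cons_of_pos hk]
      have hne : (l :: ls.filter pvKeep) ≠ [] := by simp
      rw [pvFoldA_some ls l [["00:00:00", l]], dif_neg hne]
      simp [pvInner, pvLastD]
    · rw [if_neg hk, ih, List.filter_cons_of_neg hk]

theorem pvInner_last (x : String) (v : List String) (e : String) :
    pvInner x v ++ [[pvLastD v x, e]] = pvPairsFrom x v e := by
  induction v generalizing x with
  | nil => simp [pvInner, pvPairsFrom, pvLastD]
  | cons y ys ih => simp [pvInner, pvPairsFrom, pvLastD, ih y]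

theorem pvZip_pairs (x : String) (v : List String) (e : String) :
    (((x :: (v ++ [e])).zip (v ++ [e])).map (fun p => [p.1, p.2])) = pvPairsFrom x v e := by
  induction v generalizing x with
  | nil => simp [pvPairsFrom]
  | cons y ys ih => simpa [pvPairsFrom] using ih y

-- ===== VERDICT (by name: the statement is the Claim_ definition above) =====
theorem read_clip_data_spec : Claim_equal_read_clip_data := by
  intro c e _ hpre
  unfold Spec_read_clip_data read_clip_data read_clip_data_alt
  simp only []
  set lines := (PySem.Str.split? c "\n").getD [] with hl
  have hv : lines.filter pvKeep ≠ [] := hpre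
  rw [pvFoldA_none, dif_neg hv]
  simp only [Option.getD_some]
  rw [pvInner_last]
  have := pvZip_pairs "00:00:00" (lines.filter pvKeep) e
  simpa using this.symm
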